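-- pv_equiv track=rewrite | github.com/nkavtur/python-examples | src/algorithms/amazon/wheels_count.py | fleet_count
-- ===== SOURCE A (Python) =====
-- from collections import deque
--
-- def fleet_count(wheels):
--     queue = deque([])
--     wheels_copy = wheels
--     count = 1
--     while wheels_copy > 0:
--         wheels_copy -= 2
--         queue.append(2)
--
--     count = 1
--     while len(queue) >= 2 and queue[-1] != 4:
--         last, pre_last = queue.pop(), queue.pop()
--
--         if last != 2 or pre_last != 2:
--             break
--
--         queue.appendleft(4)
--         count += 1
--
--     return count
-- ===== SOURCE B (Python) =====
-- def fleet_count(wheels):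
--     # closed form for merging pairs of two-wheel units into four-wheel ones
--     if wheels <= 0:
--         return 1
--     return 1 + (wheels + 1) // 4
-- ===== Notes on version B (the rewrite author's own statement) =====
-- stated objective: faster
-- what changed: Replaced the two deque-simulation loops (build ceil(wheels/2) twos, then repeatedly pop/merge pairs) with the closed form 1 + (wheels+1)//4 for wheels > 0, else 1.
import Mathlib
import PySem

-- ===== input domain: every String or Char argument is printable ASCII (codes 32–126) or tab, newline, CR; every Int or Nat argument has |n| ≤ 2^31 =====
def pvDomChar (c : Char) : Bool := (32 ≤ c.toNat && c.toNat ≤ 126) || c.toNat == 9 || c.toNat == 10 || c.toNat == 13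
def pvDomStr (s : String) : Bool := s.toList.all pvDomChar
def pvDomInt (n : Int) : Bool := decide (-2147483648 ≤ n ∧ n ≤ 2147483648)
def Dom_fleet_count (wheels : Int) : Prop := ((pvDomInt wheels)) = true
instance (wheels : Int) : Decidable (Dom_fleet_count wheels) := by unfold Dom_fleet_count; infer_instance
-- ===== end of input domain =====

-- B replaces A's two deque-simulation loops with a closed form (objective: faster, O(1) vs O(wheels)).

-- ===== PORT A =====
-- first while loop: while wheels_copy > 0: wheels_copy -= 2; queue.append(2)
def fleetLoop1 (wc : Int) (q : List Int) : List Int :=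
  if h : wc > 0 then fleetLoop1 (wc - 2) (q ++ [2]) else q
termination_by wc.toNat
decreasing_by omega

-- second while loop: while len(queue) >= 2 and queue[-1] != 4: pop two, break unless both 2, appendleft 4
def fleetLoop2 (q : List Int) (c : Int) : Int :=
  if h : 2 ≤ q.length ∧ q.getLast? ≠ some 4 then
    let last := q.getLast?.getD 0          -- queue.pop(): guard gives q ≠ []
    let q1 := q.dropLast
    let pre_last := q1.getLast?.getD 0     -- queue.pop() again: guard gives q1 ≠ []
    let q2 := q1.dropLast
    if last ≠ 2 ∨ pre_last ≠ 2 then c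
    else fleetLoop2 (4 :: q2) (c + 1)      -- queue.appendleft(4); count += 1
  else c
termination_by q.length
decreasing_by simp; omega

def fleet_count (wheels : Int) : Int :=
  fleetLoop2 (fleetLoop1 wheels []) 1

-- ===== PORT B =====
def fleet_count_alt (wheels : Int) : Int :=
  if wheels ≤ 0 then 1 else 1 + PySem.Int.floordiv (wheels + 1) 4

-- ===== PRECONDITION & SPEC =====
def Spec_fleet_count (wheels : Int) (out : Int) : Prop := out = fleet_count_alt wheels
instance (wheels : Int) (out : Int) : Decidable (Spec_fleet_count wheels out) := by unfold Spec_fleet_count; infer_instance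

-- ===== CLAIM (what is proved, stated in full; the proofs are below) =====
def Claim_equal_fleet_count : Prop := ∀ (wheels : Int), Dom_fleet_count wheels → Spec_fleet_count wheels (fleet_count wheels)

-- ===== LEMMAS AND PROOFS =====

-- loop 1 appends ceil(max wheels 0 / 2) twos
lemma fleetLoop1_eq : ∀ (n : Nat) (wc : Int), wc.toNat = n →
    ∀ q, fleetLoop1 wc q = q ++ List.replicate ((n + 1) / 2) 2 := by
  intro n
  induction n using Nat.strong_induction_on with
  | _ n ih =>
    intro wc hwc q
    rw [fleetLoop1]
    split
    · rename_i hpos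
      have hn : (wc - 2).toNat < n := by omega
      rw [ih _ hn (wc - 2) rfl]
      have : (n + 1) / 2 = ((wc - 2).toNat + 1) / 2 + 1 := by omega
      rw [this, List.replicate_succ, List.append_assoc]
      rfl
    · rename_i hneg
      have : n = 0 := by omega
      simp [this]

lemma rep_concat (n : Nat) (a : Int) : List.replicate (n + 1) a = List.replicate n a ++ [a] :=
  List.replicate_succ'

lemma rep_getLast? (n : Nat) (a : Int) : (List.replicate (n + 1) a).getLast? = some a := by
  rw [rep_concat, List.getLast?_concat]

-- loop 2 on a queue of k fours followed by m twos returns c + m / 2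
lemma fleetLoop2_eq : ∀ (m k : Nat) (c : Int),
    fleetLoop2 (List.replicate k 4 ++ List.replicate m 2) c = c + ((m / 2 : Nat) : Int) := by
  intro m
  induction m using Nat.strong_induction_on with
  | _ m ih =>
    intro k c
    match m with
    | 0 =>
      rw [fleetLoop2]
      match k with
      | 0 => simp
      | 1 => simp
      | k' + 2 =>
        rw [dif_neg]
        · simp
        · simp only [List.replicate_zero, List.append_nil]
          rw [rep_getLast? (k' + 1)]
          simp
    | 1 =>
      rw [fleetLoop2]
      match k with
      | 0 => simp
      | k' + 1 =>
        have hq : List.replicate (k' + 1) (4:Int) ++ List.replicate 1 2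
            = (List.replicate k' 4 ++ [4]) ++ [2] := by
          rw [rep_concat k', List.replicate_one]
        rw [dif_pos]
        · simp only [hq, List.getLast?_concat, List.dropLast_concat, Option.getD_some]
          rw [if_pos (by norm_num)]
          norm_num
        · exact ⟨by simp, by rw [hq, List.getLast?_concat]; simp⟩
    | j + 2 =>
      rw [fleetLoop2, dif_pos]
      · have hq : List.replicate k (4:Int) ++ List.replicate (j + 2) 2
            = ((List.replicate k 4 ++ List.replicate j 2) ++ [2]) ++ [2] := by
          rw [rep_concat (j + 1), rep_concat j]
          simp [List.append_assoc]
        simp only [hq, List.getLast?_concat, List.dropLast_concat, Option.getD_some]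
        rw [if_neg (by simp)]
        have h4 : (4 : Int) :: (List.replicate k 4 ++ List.replicate j 2)
            = List.replicate (k + 1) 4 ++ List.replicate j 2 := by
          simp [List.replicate_succ]
        rw [h4, ih j (by omega) (k + 1) (c + 1)]
        have : (j + 2) / 2 = j / 2 + 1 := by omega
        rw [this]
        push_cast
        ring
      · constructor
        · simp; omega
        · have hq : List.replicate k (4:Int) ++ List.replicate (j + 2) 2
              = (List.replicate k 4 ++ List.replicate (j + 1) 2) ++ [2] := by
            rw [rep_concat (j + 1)]
            simp [List.append_assoc]
          rw [hq, List.getLast?_concat]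
          simp

-- ===== VERDICT (by name: the statement is the Claim_ definition above) =====
theorem fleet_count_spec : Claim_equal_fleet_count := by
  intro wheels _
  unfold Spec_fleet_count fleet_count fleet_count_alt
  rw [fleetLoop1_eq wheels.toNat wheels rfl []]
  rw [show ([] : List Int) ++ List.replicate ((wheels.toNat + 1) / 2) 2
      = List.replicate 0 (4:Int) ++ List.replicate ((wheels.toNat + 1) / 2) 2 by simp]
  rw [fleetLoop2_eq]
  by_cases h : wheels ≤ 0
  · rw [if_pos h]
    have : wheels.toNat = 0 := by omega
    simp [this]
  · rw [if_neg h, PySem.Int.floordiv_eq_ediv_of_pos (by omega)]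
    omega
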